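-- pv_equiv track=rewrite | github.com/zznidar/OP2021 | vaje/DN4/plesalci.py | najvec_zmag
-- ===== SOURCE A (Python) =====
-- def zmage_na_plesalca(zmage):
--     out = {}
--     for par, z in zmage.items():
--         i, j = par
--         out[i] = (out.get(i, 0) + z)
--         out[j] = (out.get(j, 0) + z)
--     return(out)
--
-- def najvec_zmag(plesalci, zmage, spol = None):
--     status = zmage_na_plesalca(zmage)
--     out = set()
--     M = -1
--     if(spol):
--         plesalci = dict(filter(lambda clovek: clovek[1][2] == spol, plesalci.items()))
--     for k, v in status.items():
--         if(k in plesalci):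
--             if(v == M):
--                 out.add(k)
--             elif(v > M):
--                 out = {k}
--                 M = v
--     return(out)
-- ===== SOURCE B (Python) =====
-- def najvec_zmag(plesalci, zmage, spol = None):
--     status = {}
--     for (i, j), z in zmage.items():
--         for k in (i, j):
--             status[k] = status.get(k, 0) + z
--     if spol:
--         eligible = {k for k, v in plesalci.items() if v[2] == spol}
--     else:
--         eligible = set(plesalci)
--     # inverted index: win total -> dancers (in status order) with that total
--     groups = {}
--     for k, v in status.items():
--         if k in eligible:
--             groups.setdefault(v, []).append(k)
--     M = max([-1] + list(groups))
--     return set(groups.get(M, []))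
-- ===== Notes on version B (the rewrite author's own statement) =====
-- stated objective: alternative
-- what changed: B replaces A's running-max loop with reset-and-rebuild set bookkeeping by an inverted index: it buckets eligible dancers in a dict keyed by win total, takes M = max of the bucket keys seeded with -1, and returns the single bucket groups.get(M, []) as a set; the pair aggregation becomes an inner loop over the two dancers and the gender filter a precomputed candidate set.
import Mathlib
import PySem

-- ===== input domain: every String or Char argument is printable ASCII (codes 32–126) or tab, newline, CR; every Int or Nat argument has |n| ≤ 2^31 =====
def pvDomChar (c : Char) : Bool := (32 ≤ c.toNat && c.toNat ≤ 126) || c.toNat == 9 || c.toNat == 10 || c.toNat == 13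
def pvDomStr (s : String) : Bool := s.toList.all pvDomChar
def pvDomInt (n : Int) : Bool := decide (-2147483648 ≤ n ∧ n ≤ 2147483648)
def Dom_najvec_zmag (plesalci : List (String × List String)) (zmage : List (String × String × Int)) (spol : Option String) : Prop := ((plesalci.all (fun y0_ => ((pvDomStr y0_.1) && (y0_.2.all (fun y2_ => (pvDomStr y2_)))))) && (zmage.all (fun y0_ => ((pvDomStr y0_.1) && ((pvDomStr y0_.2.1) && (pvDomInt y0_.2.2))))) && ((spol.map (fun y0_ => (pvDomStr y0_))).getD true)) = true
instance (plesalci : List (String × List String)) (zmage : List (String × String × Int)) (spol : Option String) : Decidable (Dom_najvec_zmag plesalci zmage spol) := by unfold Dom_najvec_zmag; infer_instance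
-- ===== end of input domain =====

-- B replaces A's running-max loop (reset-and-rebuild set bookkeeping) by an inverted index bucketing dancers by win
-- total, then one max over the bucket keys seeded with -1 and one bucket lookup; same set, same cost ('alternative').

-- ===== PORT A =====
def zmage_na_plesalca (zmage : PySem.Dict (String × String) Int) : PySem.Dict String Int :=
  zmage.items.foldl (fun out pz =>
    let i := pz.1.1
    let j := pz.1.2
    let z := pz.2
    let out1 := out.insert i (out.getD i 0 + z)
    out1.insert j (out1.getD j 0 + z)) PySem.Dict.empty

def najvec_zmag (plesalci : List (String × List String)) (zmage : List (String × String × Int)) (spol : Option String) : List String :=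
  let status := zmage_na_plesalca (PySem.Dict.ofList (zmage.map (fun t => ((t.1, t.2.1), t.2.2))))
  let pd : PySem.Dict String (List String) := PySem.Dict.ofList plesalci
  -- 'if(spol):' — None and "" are falsy
  let pd2 := match spol with
    | none => pd
    | some s => if s = "" then pd
        else PySem.Dict.ofList (pd.items.filter (fun clovek => PySem.List.pyGetD clovek.2 2 "" == s))
  let r := status.items.foldl (fun (acc : PySem.Set String × Int) kv =>
      if pd2.contains kv.1 then
        if kv.2 == acc.2 then (PySem.Set.add acc.1 kv.1, acc.2)
        else if kv.2 > acc.2 then ([kv.1], kv.2)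
        else acc
      else acc) (PySem.Set.empty, -1)
  r.1

-- ===== PORT B =====
def najvec_zmag_alt (plesalci : List (String × List String)) (zmage : List (String × String × Int)) (spol : Option String) : List String :=
  let status := (PySem.Dict.ofList (zmage.map (fun t => ((t.1, t.2.1), t.2.2)))).items.foldl
    (fun st pz => [pz.1.1, pz.1.2].foldl (fun st k => st.insert k (st.getD k 0 + pz.2)) st)
    (PySem.Dict.empty : PySem.Dict String Int)
  let pd : PySem.Dict String (List String) := PySem.Dict.ofList plesalci
  let eligible : PySem.Set String := match spol with
    | none => PySem.Set.ofList pd.keys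
    | some s => if s = "" then PySem.Set.ofList pd.keys
        else PySem.Set.ofList ((pd.items.filter (fun kv => PySem.List.pyGetD kv.2 2 "" == s)).map Prod.fst)
  -- inverted index: win total -> dancers (in status order) with that total
  let groups : PySem.Dict Int (List String) := status.items.foldl
    (fun g kv => if PySem.Set.contains eligible kv.1 then g.modify kv.2 [] (fun l => l ++ [kv.1]) else g)
    PySem.Dict.empty
  let M := (PySem.List.max? ((-1) :: groups.keys) (fun v => v)).getD (-1)
  PySem.Set.ofList (groups.getD M [])

-- ===== PRECONDITION & SPEC =====
-- Pre_ excludes exactly the inputs where A raises IndexError (and B equally): a truthy spol with some dancer record of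
-- fewer than 3 fields, so that clovek[1][2] is out of range (records shadowed by a later duplicate key do not count).
def Pre_najvec_zmag (plesalci : List (String × List String)) (zmage : List (String × String × Int)) (spol : Option String) : Prop :=
  spol.getD "" ≠ "" → ∀ kv ∈ (PySem.Dict.ofList plesalci : PySem.Dict String (List String)).items, 3 ≤ kv.2.length
instance (plesalci : List (String × List String)) (zmage : List (String × String × Int)) (spol : Option String) : Decidable (Pre_najvec_zmag plesalci zmage spol) := by unfold Pre_najvec_zmag; infer_instance
def pvWitness_najvec_zmag : (List (String × List String)) × (List (String × String × Int)) × Option String :=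
  ([("ana", ["1990", "SLO", "F"]), ("bor", ["1991", "SLO", "M"])], [("ana", "bor", 3), ("ana", "cen", 1)], some "F")
def Spec_najvec_zmag (plesalci : List (String × List String)) (zmage : List (String × String × Int)) (spol : Option String) (out : List String) : Prop := out = najvec_zmag_alt plesalci zmage spol
instance (plesalci : List (String × List String)) (zmage : List (String × String × Int)) (spol : Option String) (out : List String) : Decidable (Spec_najvec_zmag plesalci zmage spol out) := by unfold Spec_najvec_zmag; infer_instance

-- ===== CLAIM (what is proved, stated in full; the proofs are below) =====
def Claim_equal_najvec_zmag : Prop := ∀ (plesalci : List (String × List String)) (zmage : List (String × String × Int)) (spol : Option String), Dom_najvec_zmag plesalci zmage spol → Pre_najvec_zmag plesalci zmage spol → Spec_najvec_zmag plesalci zmage spol (najvec_zmag plesalci zmage spol)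

-- ===== LEMMAS AND PROOFS =====

-- A's loop body, abstracted over the membership test.
def pvStep (c : String → Bool) (acc : PySem.Set String × Int) (kv : String × Int) : PySem.Set String × Int :=
  if c kv.1 then
    if kv.2 == acc.2 then (PySem.Set.add acc.1 kv.1, acc.2)
    else if kv.2 > acc.2 then ([kv.1], kv.2)
    else acc
  else acc

-- running maximum of the win totals of the eligible dancers, seeded with -1
def pvMax (c : String → Bool) (l : List (String × Int)) : Int :=
  ((l.filter (fun kv => c kv.1)).map Prod.snd).foldl max (-1)

lemma pvMax_le (c : String → Bool) (l : List (String × Int)) (kv : String × Int)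
    (hm : kv ∈ l) (hc : c kv.1 = true) : kv.2 ≤ pvMax c l := by
  exact (PySem.List.le_foldl_max _ _).2 kv.2
    (List.mem_map.2 ⟨kv, List.mem_filter.2 ⟨hm, by simp [hc]⟩, rfl⟩)

-- A's single pass computes exactly the maximum and the eligible keys attaining it, in order.
lemma loop_spec (c : String → Bool) (l : List (String × Int)) :
    l.foldl (pvStep c) (PySem.Set.empty, -1)
      = (PySem.Set.ofList ((l.filter (fun kv => c kv.1 && kv.2 == pvMax c l)).map Prod.fst), pvMax c l) := by
  induction l using List.reverseRecOn with
  | nil => rfl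
  | append_singleton l x ih =>
    have hM : pvMax c (l ++ [x]) = if c x.1 then max (pvMax c l) x.2 else pvMax c l := by
      by_cases hc : c x.1 = true <;>
        simp [pvMax, List.filter_append, hc, List.foldl_append]
    rw [List.foldl_append, ih]
    by_cases hc : c x.1 = true
    · by_cases heq : x.2 = pvMax c l
      · have hM' : pvMax c (l ++ [x]) = pvMax c l := by simp [hM, hc, heq]
        simp only [List.foldl_cons, List.foldl_nil, pvStep, hc, if_true, heq, BEq.rfl, hM']
        rw [List.filter_append, List.map_append]
        simp only [List.filter_cons, List.filter_nil, hc, heq, BEq.rfl, Bool.and_self,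
          if_true, List.map_cons, List.map_nil]
        rw [PySem.Set.ofList_append_singleton]
      · by_cases hgt : pvMax c l < x.2
        · have hM' : pvMax c (l ++ [x]) = x.2 := by simp [hM, hc]; omega
          have hnil : l.filter (fun kv => c kv.1 && kv.2 == pvMax c (l ++ [x])) = [] := by
            rw [List.filter_eq_nil_iff]
            intro kv hkv
            simp only [Bool.and_eq_true, beq_iff_eq, not_and, hM']
            intro hckv
            have := pvMax_le c l kv hkv hckv
            omega
          simp only [List.foldl_cons, List.foldl_nil, pvStep, hc, if_true]
          rw [if_neg (by simpa using heq), if_pos (by simpa using hgt)]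
          rw [List.filter_append, List.map_append, hnil, hM']
          simp [hc]
          rfl
        · have hlt : x.2 < pvMax c l := by omega
          have hM' : pvMax c (l ++ [x]) = pvMax c l := by simp [hM, hc]; omega
          simp only [List.foldl_cons, List.foldl_nil, pvStep, hc, if_true]
          rw [if_neg (by simpa using heq), if_neg (by simpa using (by omega : ¬ pvMax c l < x.2))]
          rw [List.filter_append, List.map_append, hM']
          have : List.filter (fun kv => c kv.1 && kv.2 == pvMax c l) [x] = [] := by
            simp [heq]
          rw [this]
          simp
    · have hcf : c x.1 = false := by simpa using hc
      have hM' : pvMax c (l ++ [x]) = pvMax c l := by simp [hM, hcf]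
      simp only [List.foldl_cons, List.foldl_nil, pvStep, hcf]
      rw [List.filter_append, hM']
      simp [hcf]

-- the two ports test candidate membership with the same Boolean function
lemma contains_ofList_eq_set (xs : List (String × List String)) (k : String) :
    (PySem.Dict.ofList xs).contains k = PySem.Set.contains (PySem.Set.ofList (xs.map Prod.fst)) k := by
  have hkeys : (PySem.Dict.ofList xs).keys = PySem.Set.ofList (xs.map Prod.fst) := by
    have := PySem.Dict.keys_foldl_insert_key (ν := List String) xs (fun kv => kv.1)
      (fun _ kv => kv.2) PySem.Dict.empty
    simpa [PySem.Set.update_nil_left] using this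
  rw [Bool.eq_iff_iff, PySem.Dict.contains_iff_mem_keys, PySem.Set.contains_iff, hkeys]

lemma contains_keys_eq_set {ν : Type} (d : PySem.Dict String ν) (k : String) :
    d.contains k = PySem.Set.contains (PySem.Set.ofList d.keys) k := by
  rw [Bool.eq_iff_iff, PySem.Dict.contains_iff_mem_keys, PySem.Set.contains_iff]
  exact (PySem.Set.mem_ofList _ _).symm

-- B's bucket fold restricted to the eligible entries
def pvBucket (c : String → Bool) (l : List (String × Int)) : PySem.Dict Int (List String) :=
  l.foldl (fun g kv => if c kv.1 then g.modify kv.2 [] (fun t => t ++ [kv.1]) else g) PySem.Dict.empty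

-- each bucket is exactly the eligible keys with that total, in order
lemma bucket_getD (c : String → Bool) (l : List (String × Int)) (v : Int) :
    (pvBucket c l).getD v [] = (l.filter (fun kv => c kv.1 && kv.2 == v)).map Prod.fst := by
  unfold pvBucket
  induction l using List.reverseRecOn with
  | nil => rfl
  | append_singleton l x ih =>
    rw [List.foldl_append, List.filter_append, List.map_append]
    by_cases hc : c x.1 = true
    · simp only [List.foldl_cons, List.foldl_nil, hc, if_true]
      rw [PySem.Dict.getD_modify]
      by_cases hv : v = x.2
      · subst hv; simp [ih, hc]
      · simp [hv, ih, Ne.symm hv]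
    · have hcf : c x.1 = false := by simpa using hc
      simp [hcf, ih]

-- the bucket keys are the eligible totals, deduplicated in order
lemma bucket_keys (c : String → Bool) (l : List (String × Int)) :
    (pvBucket c l).keys = PySem.Set.ofList ((l.filter (fun kv => c kv.1)).map Prod.snd) := by
  unfold pvBucket
  rw [show (l.foldl (fun g kv => if c kv.1 then g.modify kv.2 [] (fun t => t ++ [kv.1]) else g)
        (PySem.Dict.empty : PySem.Dict Int (List String)))
      = (l.filter (fun kv => c kv.1)).foldl
          (fun g kv => g.modify kv.2 [] (fun t => t ++ [kv.1])) PySem.Dict.empty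
    from PySem.List.foldl_if_eq_foldl_filter _ _ _ _]
  rw [PySem.Dict.keys_foldl_modify_key (l.filter (fun kv => c kv.1)) (fun kv => kv.2)
    ([] : List String) (fun _ kv => fun t => t ++ [kv.1]) PySem.Dict.empty]
  simp [PySem.Set.update_nil_left]

-- foldl max is invariant under passing to the deduplicated list
lemma foldl_max_subset_le (a : Int) (l1 l2 : List Int) (h : ∀ x ∈ l1, x ∈ l2) :
    l1.foldl max a ≤ l2.foldl max a := by
  rcases PySem.List.foldl_max_mem l1 a with he | hm
  · rw [he]; exact (PySem.List.le_foldl_max l2 a).1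
  · exact (PySem.List.le_foldl_max l2 a).2 _ (h _ hm)
lemma foldl_max_ofList (a : Int) (l : List Int) :
    (PySem.Set.ofList l : List Int).foldl max a = l.foldl max a := by
  apply le_antisymm
  · exact foldl_max_subset_le a _ l (fun x hx => (PySem.Set.mem_ofList _ _).1 hx)
  · exact foldl_max_subset_le a l _ (fun x hx => (PySem.Set.mem_ofList _ _).2 hx)

-- A's loop with an abstract membership test equals B's bucket-index computation with a pointwise-equal test
lemma key_lemma (l : List (String × Int)) (pd2 : PySem.Dict String (List String)) (cand : PySem.Set String)
    (hc : ∀ k, pd2.contains k = PySem.Set.contains cand k) :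
    (l.foldl (fun (acc : PySem.Set String × Int) kv =>
        if pd2.contains kv.1 then
          if kv.2 == acc.2 then (PySem.Set.add acc.1 kv.1, acc.2)
          else if kv.2 > acc.2 then ([kv.1], kv.2)
          else acc
        else acc) (PySem.Set.empty, -1)).1
    = PySem.Set.ofList
        ((pvBucket (fun k => PySem.Set.contains cand k) l).getD
          ((PySem.List.max? ((-1) :: (pvBucket (fun k => PySem.Set.contains cand k) l).keys) (fun v => v)).getD (-1)) []) := by
  have hcfun : (fun k => PySem.Set.contains cand k) = (fun k => pd2.contains k) := by
    funext k; rw [hc]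
  have hM : (PySem.List.max? ((-1) :: (pvBucket (fun k => PySem.Set.contains cand k) l).keys) (fun v => v)).getD (-1)
      = pvMax (fun k => pd2.contains k) l := by
    have h2 : List.filter (fun kv : String × Int => PySem.Set.contains cand kv.1) l
        = List.filter (fun kv => pd2.contains kv.1) l :=
      List.filter_congr (fun kv _ => (hc kv.1).symm)
    rw [PySem.List.max?_id_cons, Option.getD_some, bucket_keys, foldl_max_ofList, h2]; rfl
  have hA : l.foldl (fun (acc : PySem.Set String × Int) kv =>
      if pd2.contains kv.1 then
        if kv.2 == acc.2 then (PySem.Set.add acc.1 kv.1, acc.2)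
        else if kv.2 > acc.2 then ([kv.1], kv.2)
        else acc
      else acc) (PySem.Set.empty, -1)
      = l.foldl (pvStep (fun k => pd2.contains k)) (PySem.Set.empty, -1) := rfl
  rw [hM, hA, loop_spec, bucket_getD]
  have h3 : List.filter (fun kv : String × Int => pd2.contains kv.1 && kv.2 == pvMax (fun k => pd2.contains k) l) l
      = List.filter (fun kv => PySem.Set.contains cand kv.1 && kv.2 == pvMax (fun k => pd2.contains k) l) l :=
    List.filter_congr (fun kv _ => by rw [hc])
  dsimp only
  rw [h3]

-- B's aggregation loop (inner fold over the two dancers of a pair) unfolds to A's two inserts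
lemma status_eq (zl : List ((String × String) × Int)) :
    (PySem.Dict.ofList zl).items.foldl
      (fun st pz => [pz.1.1, pz.1.2].foldl (fun st k => st.insert k (st.getD k 0 + pz.2)) st)
      (PySem.Dict.empty : PySem.Dict String Int)
    = (PySem.Dict.ofList zl).items.foldl (fun out pz =>
        (out.insert pz.1.1 (out.getD pz.1.1 0 + pz.2)).insert pz.1.2
          ((out.insert pz.1.1 (out.getD pz.1.1 0 + pz.2)).getD pz.1.2 0 + pz.2)) PySem.Dict.empty := rfl

-- ===== VERDICT (by name: the statement is the Claim_ definition above) =====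
theorem najvec_zmag_spec : Claim_equal_najvec_zmag := by
  intro plesalci zmage spol _hdom _hpre
  unfold Spec_najvec_zmag najvec_zmag najvec_zmag_alt zmage_na_plesalca
  cases spol with
  | none =>
    dsimp only
    rw [status_eq]
    generalize (List.foldl
        (fun out pz =>
          (out.insert pz.1.1 (out.getD pz.1.1 0 + pz.2)).insert pz.1.2
            ((out.insert pz.1.1 (out.getD pz.1.1 0 + pz.2)).getD pz.1.2 0 + pz.2))
        (PySem.Dict.empty : PySem.Dict String Int)
        (PySem.Dict.ofList (List.map (fun t => ((t.1, t.2.1), t.2.2)) zmage)).items).items = l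
    exact key_lemma l (PySem.Dict.ofList plesalci)
      (PySem.Set.ofList (PySem.Dict.ofList plesalci : PySem.Dict String (List String)).keys)
      (fun k => contains_keys_eq_set _ k)
  | some s =>
    dsimp only
    rw [status_eq]
    generalize (List.foldl
        (fun out pz =>
          (out.insert pz.1.1 (out.getD pz.1.1 0 + pz.2)).insert pz.1.2
            ((out.insert pz.1.1 (out.getD pz.1.1 0 + pz.2)).getD pz.1.2 0 + pz.2))
        (PySem.Dict.empty : PySem.Dict String Int)
        (PySem.Dict.ofList (List.map (fun t => ((t.1, t.2.1), t.2.2)) zmage)).items).items = l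
    by_cases hs : s = ""
    · simp only [if_pos hs]
      exact key_lemma l (PySem.Dict.ofList plesalci)
        (PySem.Set.ofList (PySem.Dict.ofList plesalci : PySem.Dict String (List String)).keys)
        (fun k => contains_keys_eq_set _ k)
    · simp only [if_neg hs]
      generalize ((PySem.Dict.ofList plesalci : PySem.Dict String (List String)).items.filter
          (fun clovek => PySem.List.pyGetD clovek.2 2 "" == s)) = q
      exact key_lemma l (PySem.Dict.ofList q) (PySem.Set.ofList (q.map Prod.fst))
        (fun k => contains_ofList_eq_set q k)
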